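-- pv_equiv track=rewrite | github.com/gcc-cdimatteo/Algoritmos-y-Programacion-I-75.40 | Parciales/2023C1P0-20230427-suma_loca.py | suma_loca
-- ===== SOURCE A (Python) =====
-- def suma_loca(lista: list) -> list:
--     suma = []
--
--     for i in range(len(lista)):
--         total = 0
--         for j in range(len(lista)):
--             if i == j: continue
--             total += lista[j]
--         suma.append(total)
--
--     return suma
-- ===== SOURCE B (Python) =====
-- def suma_loca(lista: list) -> list:
--     total = sum(lista)
--     return [total - x for x in lista]
-- ===== Notes on version B (the rewrite author's own statement) =====
-- stated objective: faster
-- what changed: replaces the nested O(n^2) index loops by computing the total sum once and subtracting each element in a single pass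
import Mathlib
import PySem

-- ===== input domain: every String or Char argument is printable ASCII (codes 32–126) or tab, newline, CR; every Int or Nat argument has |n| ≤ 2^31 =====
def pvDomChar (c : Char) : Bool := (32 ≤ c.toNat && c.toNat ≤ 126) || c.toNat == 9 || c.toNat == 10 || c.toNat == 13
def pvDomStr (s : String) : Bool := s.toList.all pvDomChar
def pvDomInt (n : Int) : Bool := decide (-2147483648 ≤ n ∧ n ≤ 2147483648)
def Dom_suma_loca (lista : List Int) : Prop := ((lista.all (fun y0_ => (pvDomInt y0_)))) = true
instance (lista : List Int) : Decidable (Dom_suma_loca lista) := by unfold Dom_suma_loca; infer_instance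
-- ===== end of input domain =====

-- B computes the total sum once and subtracts each element (O(n)) instead of A's nested loops (O(n^2)).

-- ===== PORT A =====
def suma_loca (lista : List Int) : List Int :=
  (List.range lista.length).foldl
    (fun suma i =>
      suma ++ [(List.range lista.length).foldl
        (fun total j => if i = j then total else total + lista.getD j 0) 0])
    []

-- ===== PORT B =====
def suma_loca_alt (lista : List Int) : List Int :=
  let total := lista.sum
  lista.map (fun x => total - x)

-- ===== PRECONDITION & SPEC =====
def Spec_suma_loca (lista : List Int) (out : List Int) : Prop := out = suma_loca_alt lista
instance (lista : List Int) (out : List Int) : Decidable (Spec_suma_loca lista out) := by unfold Spec_suma_loca; infer_instance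

-- ===== CLAIM (what is proved, stated in full; the proofs are below) =====
def Claim_equal_suma_loca : Prop := ∀ (lista : List Int), Dom_suma_loca lista → Spec_suma_loca lista (suma_loca lista)

-- ===== LEMMAS AND PROOFS =====

-- The elements of l read off by index over range l.length are l itself.
theorem pv_getD_range_map (l : List Int) :
    (List.range l.length).map (fun i => l.getD i 0) = l := by
  induction l with
  | nil => simp
  | cons x xs ih =>
    simp only [List.length_cons, List.range_succ_eq_map, List.map_cons, List.map_map,
      List.getD_cons_zero]
    exact congrArg (x :: ·) ih

-- A's inner loop: sum over the first n indices, skipping index i.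
theorem pv_inner (l : List Int) (i : Nat) (n : Nat) :
    (List.range n).foldl (fun total j => if i = j then total else total + l.getD j 0) 0
      = ((List.range n).map (fun j => l.getD j 0)).sum - (if i < n then l.getD i 0 else 0) := by
  induction n with
  | zero => simp
  | succ n ih =>
    rw [List.range_succ, List.foldl_append, List.map_append, List.sum_append, ih]
    simp only [List.foldl_cons, List.foldl_nil, List.map_cons, List.map_nil, List.sum_cons,
      List.sum_nil]
    by_cases h : i = n
    · subst h
      simp
    · have h2 : (i < n + 1) ↔ (i < n) := by omega
      simp only [if_neg h, h2]
      by_cases h3 : i < n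
      · simp only [if_pos h3]
        ring
      · simp [h3]

-- ===== VERDICT (by name: the statement is the Claim_ definition above) =====
theorem suma_loca_spec : Claim_equal_suma_loca := by
  intro lista _
  unfold Spec_suma_loca suma_loca suma_loca_alt
  rw [PySem.List.foldl_append_singleton_eq_map, List.nil_append]
  have hmap :
      (List.range lista.length).map
        (fun i =>
          (List.range lista.length).foldl
            (fun total j => if i = j then total else total + lista.getD j 0) 0)
      = (List.range lista.length).map (fun i => lista.sum - lista.getD i 0) := by
    apply List.map_congr_left
    intro i hi
    rw [pv_inner, pv_getD_range_map, if_pos (List.mem_range.mp hi)]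
  rw [hmap]
  have : (List.range lista.length).map (fun i => lista.sum - lista.getD i 0)
      = ((List.range lista.length).map (fun i => lista.getD i 0)).map (fun x => lista.sum - x) := by
    rw [List.map_map]; rfl
  rw [this, pv_getD_range_map]
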